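-- pv_equiv track=rewrite | github.com/xerrors/xerrors | runner.py | _parse_configurations
-- ===== SOURCE A (Python) =====
-- def _parse_configurations(configs):
--     """ Depth first search to parse all possible combinations of configurations"""
--     if len(configs) == 0:
--         return []
--
--     combinations = [{}]
--     for key, value in configs.items():
--         if isinstance(value, list):
--             new_combinations = []
--             for item in value:
--                 for combination in combinations:
--                     new_combinations.append({**combination, key: item})
--             combinations = new_combinations
--         else:
--             for combination in combinations:
--                 combination[key] = value
--
--     return combinations
-- ===== SOURCE B (Python) =====
-- def _parse_configurations(configs):
--     """Recursive DFS over the config items (combo-outer/item-inner to keep A's order)."""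
--     if not configs:
--         return []
--     items = list(configs.items())
--
--     def rec(i):
--         if i == len(items):
--             return [{}]
--         key, value = items[i]
--         rest = rec(i + 1)
--         if isinstance(value, list):
--             result = []
--             for combo in rest:
--                 for item in value:
--                     result.append({key: item, **combo})
--             return result
--         else:
--             return [{key: value, **combo} for combo in rest]
--
--     return rec(0)
-- ===== Notes on version B (the rewrite author's own statement) =====
-- stated objective: alternative
-- what changed: Replaced A's iterative breadth-first rebuild of the whole combination list key by key with a recursive DFS over the items (base case [{}], combo-outer/item-inner so the first key varies fastest, matching A's order exactly).
import Mathlib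
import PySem

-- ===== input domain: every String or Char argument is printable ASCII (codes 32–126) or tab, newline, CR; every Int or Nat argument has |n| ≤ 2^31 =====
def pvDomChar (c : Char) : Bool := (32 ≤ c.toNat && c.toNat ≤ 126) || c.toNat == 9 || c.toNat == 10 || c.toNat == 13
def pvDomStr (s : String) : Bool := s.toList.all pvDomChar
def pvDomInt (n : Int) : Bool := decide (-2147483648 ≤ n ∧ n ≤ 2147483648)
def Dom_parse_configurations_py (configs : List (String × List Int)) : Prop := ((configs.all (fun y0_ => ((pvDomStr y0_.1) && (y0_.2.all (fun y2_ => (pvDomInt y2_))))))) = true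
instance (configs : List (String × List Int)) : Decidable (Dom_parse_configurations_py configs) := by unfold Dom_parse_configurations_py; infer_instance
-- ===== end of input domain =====

-- B re-implements A as a recursive DFS over the items (head recursion, combo-outer/item-inner)
-- instead of A's iterative breadth-first rebuilding of the whole combination list per key: same
-- values, different decomposition ("alternative"). All dict values have type List Int here, so
-- A's scalar broadcast branch ("isinstance(value, list)" false) is unreachable and not ported.

-- ===== PORT A =====
-- {**combination, key: item} is ported as combination ++ [(key, item)]: exact because under
-- Pre_ the keys are pairwise distinct, so `key` never occurs in `combination`.
def parse_configurations_py (configs : List (String × List Int)) : List (List (String × Int)) :=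
  if configs.length = 0 then [] else
    configs.foldl
      (fun combinations kv =>
        -- new_combinations = []; for item in value: for combination in combinations: append
        kv.2.foldl
          (fun new_combinations item =>
            combinations.foldl
              (fun acc combination => acc ++ [combination ++ [(kv.1, item)]])
              new_combinations)
          [])
      [[]]

-- ===== PORT B =====
-- {key: item, **combo} is ported as (key, item) :: combo: exact because under Pre_ the keys
-- are pairwise distinct, so `key` never occurs in `combo`.
def pvRec : List (String × List Int) → List (List (String × Int))
  | [] => [[]]
  | (key, value) :: rest =>
      let rest' := pvRec rest
      -- result = []; for combo in rest': for item in value: result.append((key,item) :: combo)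
      rest'.foldl (fun result combo => result ++ value.map (fun item => (key, item) :: combo)) []

def parse_configurations_py_alt (configs : List (String × List Int)) : List (List (String × Int)) :=
  if configs.length = 0 then [] else pvRec configs

-- ===== PRECONDITION & SPEC =====
-- Pre_ excludes association lists with duplicate keys: they represent no Python dict (A's
-- argument is a dict, which cannot hold two entries with the same key), so A is never called
-- on them; it also licenses porting the dict-merge expressions as append/cons above.
def Pre_parse_configurations_py (configs : List (String × List Int)) : Prop :=
  (configs.map Prod.fst).Nodup
instance (configs : List (String × List Int)) : Decidable (Pre_parse_configurations_py configs) := by unfold Pre_parse_configurations_py; infer_instance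

def pvWitness_parse_configurations_py : (List (String × List Int)) :=
  [("lr", [1, 2]), ("epochs", [3]), ("seed", [4, 5])]

def Spec_parse_configurations_py (configs : List (String × List Int)) (out : List (List (String × Int))) : Prop := out = parse_configurations_py_alt configs
instance (configs : List (String × List Int)) (out : List (List (String × Int))) : Decidable (Spec_parse_configurations_py configs out) := by unfold Spec_parse_configurations_py; infer_instance

-- ===== CLAIM (what is proved, stated in full; the proofs are below) =====
def Claim_equal_parse_configurations_py : Prop := ∀ (configs : List (String × List Int)), Dom_parse_configurations_py configs → Pre_parse_configurations_py configs → Spec_parse_configurations_py configs (parse_configurations_py configs)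

-- ===== LEMMAS AND PROOFS =====

-- A's inner double loop is the flatMap "for item: for combination: combination ++ [(k,item)]".
theorem stepA_eq_flatMap (combinations : List (List (String × Int))) (k : String)
    (v : List Int) :
    v.foldl
      (fun new_combinations item =>
        combinations.foldl
          (fun acc combination => acc ++ [combination ++ [(k, item)]]) new_combinations)
      [] =
    v.flatMap (fun item => combinations.map (fun c => c ++ [(k, item)])) := by
  have inner : ∀ (item : Int) (acc : List (List (String × Int))),
      combinations.foldl (fun acc combination => acc ++ [combination ++ [(k, item)]]) acc =
      acc ++ combinations.map (fun c => c ++ [(k, item)]) := by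
    intro item acc
    exact PySem.List.foldl_append_singleton_eq_map ..
  have outer : ∀ (w : List Int) (acc : List (List (String × Int))),
      w.foldl
        (fun new_combinations item =>
          combinations.foldl
            (fun acc combination => acc ++ [combination ++ [(k, item)]]) new_combinations)
        acc =
      acc ++ w.flatMap (fun item => combinations.map (fun c => c ++ [(k, item)])) := by
    intro w
    induction w with
    | nil => simp
    | cons x xs ih =>
        intro acc
        simp [List.foldl_cons, inner, List.append_assoc, ← List.flatMap_def]
  simpa using outer v []

-- B's loop over rest' is the flatMap "for combo: for item: (k,item) :: combo".
theorem stepB_eq_flatMap (rest' : List (List (String × Int))) (k : String) (v : List Int) :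
    rest'.foldl (fun result combo => result ++ v.map (fun item => (k, item) :: combo)) [] =
    rest'.flatMap (fun combo => v.map (fun item => (k, item) :: combo)) := by
  have h : ∀ (l : List (List (String × Int))) (acc : List (List (String × Int))),
      l.foldl (fun result combo => result ++ v.map (fun item => (k, item) :: combo)) acc =
      acc ++ l.flatMap (fun combo => v.map (fun item => (k, item) :: combo)) := by
    intro l
    induction l with
    | nil => simp
    | cons c cs ih => intro acc; simp [List.foldl_cons, ih, List.append_assoc]
  simpa using h rest' []

-- A's left fold, started from any accumulator, appends each DFS tail of pvRec to each
-- accumulator element (tail outer, accumulator inner).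
theorem foldl_eq_pvRec (l : List (String × List Int)) :
    ∀ (acc : List (List (String × Int))),
      l.foldl
        (fun combinations kv =>
          kv.2.foldl
            (fun new_combinations item =>
              combinations.foldl
                (fun acc combination => acc ++ [combination ++ [(kv.1, item)]])
                new_combinations)
            [])
        acc =
      (pvRec l).flatMap (fun t => acc.map (fun c => c ++ t)) := by
  induction l with
  | nil => intro acc; simp [pvRec]
  | cons kv rest ih =>
      intro acc
      obtain ⟨k, v⟩ := kv
      rw [List.foldl_cons, ih, stepA_eq_flatMap]
      show _ = (pvRec ((k, v) :: rest)).flatMap _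
      simp only [pvRec, stepB_eq_flatMap, List.flatMap_assoc, List.flatMap_map]
      refine List.flatMap_congr ?_
      intro t _
      rw [List.map_flatMap]
      refine List.flatMap_congr ?_
      intro a _
      rw [List.map_map]
      refine List.map_congr_left ?_
      intro c _
      simp [List.append_assoc]

-- ===== VERDICT (by name: the statement is the Claim_ definition above) =====
theorem parse_configurations_py_spec : Claim_equal_parse_configurations_py := by
  intro configs _dom _pre
  unfold Spec_parse_configurations_py parse_configurations_py parse_configurations_py_alt
  by_cases h : configs.length = 0
  · simp [h]
  · simp only [h, if_false]
    rw [foldl_eq_pvRec]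
    simp
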